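-- pv_equiv track=rewrite | github.com/TomatoInOil/algorithms-templates | python/sprint1_nonfinals/final1.py | get_distances_to_empty_plot
-- ===== SOURCE A (Python) =====
-- from typing import List, Tuple
--
-- def get_distances_to_empty_plot(
--     street_length: int, house_numbers: List[str]
-- ) -> List[str]:
--     indexes_of_zeros = []
--     for index, house in enumerate(house_numbers):
--         if house == "0":
--             indexes_of_zeros.append(index)
--     for index in range(len(indexes_of_zeros) - 1):
--         if indexes_of_zeros[index + 1] - indexes_of_zeros[index] > 1:
--             left = indexes_of_zeros[index] + 1
--             right = indexes_of_zeros[index + 1] - 1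
--             current_distance = 1
--             while left <= right:
--                 house_numbers[left] = house_numbers[right] = str(
--                     current_distance
--                 )
--                 current_distance += 1
--                 left += 1
--                 right -= 1
--     if indexes_of_zeros[0] != 0:
--         current_distance = 1
--         right = indexes_of_zeros[0] - 1
--         while right >= 0:
--             house_numbers[right] = str(current_distance)
--             current_distance += 1
--             right -= 1
--     if indexes_of_zeros[-1] != street_length - 1:
--         current_distance = 1
--         left = indexes_of_zeros[-1] + 1
--         while left <= street_length - 1:
--             house_numbers[left] = str(current_distance)
--             current_distance += 1
--             left += 1
--     return house_numbers
-- ===== SOURCE B (Python) =====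
-- from typing import List
--
--
-- def get_distances_to_empty_plot(
--     street_length: int, house_numbers: List[str]
-- ) -> List[str]:
--     zeros = [i for i, h in enumerate(house_numbers) if h == "0"]
--     last = zeros[-1]
--     # up to the last empty plot every house gets its distance to the nearest one
--     for i in range(last):
--         if house_numbers[i] != "0":
--             house_numbers[i] = str(min(abs(i - z) for z in zeros))
--     # after the last empty plot, distances grow to the end of the street
--     for i in range(last + 1, street_length):
--         house_numbers[i] = str(i - last)
--     return house_numbers
-- ===== Notes on version B (the rewrite author's own statement) =====
-- stated objective: simpler
-- what changed: B replaces A's three symmetric two-pointer interval fills (between consecutive zeros, before the first zero, after the last zero) by two plain forward passes: up to the last empty plot each house gets its minimum absolute distance to the zero indices, and after the last empty plot distances grow to the end of the street; Pre_ excludes inputs with no '0' and inputs with street_length > len(house_numbers), on which both programs raise IndexError.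
import Mathlib
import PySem

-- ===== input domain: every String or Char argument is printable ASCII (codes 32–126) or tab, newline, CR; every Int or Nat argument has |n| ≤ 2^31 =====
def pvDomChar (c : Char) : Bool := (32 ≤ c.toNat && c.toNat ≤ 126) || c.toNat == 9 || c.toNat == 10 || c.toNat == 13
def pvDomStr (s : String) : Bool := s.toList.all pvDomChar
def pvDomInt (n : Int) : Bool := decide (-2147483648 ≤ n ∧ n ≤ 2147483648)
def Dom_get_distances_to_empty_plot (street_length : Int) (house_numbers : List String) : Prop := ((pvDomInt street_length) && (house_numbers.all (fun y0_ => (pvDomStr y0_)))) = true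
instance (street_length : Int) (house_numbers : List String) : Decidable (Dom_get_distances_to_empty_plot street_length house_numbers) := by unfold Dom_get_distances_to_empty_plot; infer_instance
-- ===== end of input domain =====

-- B replaces A's three in-place two-pointer interval fills by one per-position
-- minimum over the zero indices (objective: simpler).  A mutates house_numbers in
-- place and returns it; B performs the same in-place replacement, and the
-- equivalence proved here is about the RETURN value.

-- ===== PORT A =====
-- the symmetric while-loop filling between two consecutive zeros
-- (indices are in range on every input admitted by Pre_, so pySetD is exact there)
def pvFillMid (hn : List String) (left right d : Int) : List String :=
  if left ≤ right then
    pvFillMid (PySem.List.pySetD (PySem.List.pySetD hn left (PySem.Int.toStr d)) right (PySem.Int.toStr d))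
      (left + 1) (right - 1) (d + 1)
  else hn
termination_by (right + 1 - left).toNat
decreasing_by omega

-- the head while-loop (right downto 0)
def pvFillHead (hn : List String) (right d : Int) : List String :=
  if 0 ≤ right then pvFillHead (PySem.List.pySetD hn right (PySem.Int.toStr d)) (right - 1) (d + 1) else hn
termination_by (right + 1).toNat
decreasing_by omega

-- the tail while-loop (left up to street_length - 1)
def pvFillTail (hn : List String) (street_length left d : Int) : List String :=
  if left ≤ street_length - 1 then
    pvFillTail (PySem.List.pySetD hn left (PySem.Int.toStr d)) street_length (left + 1) (d + 1)
  else hn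
termination_by (street_length - left).toNat
decreasing_by omega

def get_distances_to_empty_plot (street_length : Int) (house_numbers : List String) : List String :=
  let zeros : List Int := (PySem.List.enumerate house_numbers).foldl
    (fun acc p => if p.2 = "0" then acc ++ [p.1] else acc) []
  let hn1 := (PySem.List.pyRange 0 ((zeros.length : Int) - 1) 1).foldl
    (fun h idx =>
      let zi := PySem.List.pyGetD zeros idx 0
      let zi1 := PySem.List.pyGetD zeros (idx + 1) 0
      if zi1 - zi > 1 then pvFillMid h (zi + 1) (zi1 - 1) 1 else h) house_numbers
  -- indexes_of_zeros[0] / indexes_of_zeros[-1] raise IndexError when no "0" exists: excluded by Pre_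
  let z0 := PySem.List.pyGetD zeros 0 0
  let zl := PySem.List.pyGetD zeros (-1) 0
  let hn2 := if z0 ≠ 0 then pvFillHead hn1 (z0 - 1) 1 else hn1
  if zl ≠ street_length - 1 then pvFillTail hn2 street_length (zl + 1) 1 else hn2

-- ===== PORT B =====
def get_distances_to_empty_plot_alt (street_length : Int) (house_numbers : List String) : List String :=
  let zeros : List Int := ((PySem.List.enumerate house_numbers).filter (fun p => p.2 = "0")).map (·.1)
  -- zeros[-1] raises IndexError when no "0" exists: excluded by Pre_
  let last := PySem.List.pyGetD zeros (-1) 0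
  -- first loop: indices are in range on every input admitted by Pre_, so pyGetD/pySetD are exact
  let hn1 := (PySem.List.pyRange 0 last 1).foldl
    (fun h i =>
      if PySem.List.pyGetD h i "" ≠ "0" then
        PySem.List.pySetD h i (PySem.Int.toStr
          ((PySem.List.min? (zeros.map (fun z => ((i - z).natAbs : Int))) (fun x => x)).getD 0))
      else h) house_numbers
  -- second loop: for street_length > len(house_numbers) the assignment raises, excluded by Pre_
  (PySem.List.pyRange (last + 1) street_length 1).foldl
    (fun h i => PySem.List.pySetD h i (PySem.Int.toStr (i - last))) hn1

-- ===== PRECONDITION & SPEC =====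
-- Pre_ excludes exactly the inputs on which A raises: lists without a "0" (A's
-- indexes_of_zeros[0] raises IndexError) and street_length > len(house_numbers)
-- (A's tail loop then assigns past the end of the list and raises IndexError).
def Pre_get_distances_to_empty_plot (street_length : Int) (house_numbers : List String) : Prop :=
  "0" ∈ house_numbers ∧ street_length ≤ (house_numbers.length : Int)
instance (street_length : Int) (house_numbers : List String) : Decidable (Pre_get_distances_to_empty_plot street_length house_numbers) := by unfold Pre_get_distances_to_empty_plot; infer_instance

def pvWitness_get_distances_to_empty_plot : Int × List String := (5, ["3", "0", "7", "7", "0"])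

def Spec_get_distances_to_empty_plot (street_length : Int) (house_numbers : List String) (out : List String) : Prop := out = get_distances_to_empty_plot_alt street_length house_numbers
instance (street_length : Int) (house_numbers : List String) (out : List String) : Decidable (Spec_get_distances_to_empty_plot street_length house_numbers out) := by unfold Spec_get_distances_to_empty_plot; infer_instance

-- ===== CLAIM (what is proved, stated in full; the proofs are below) =====
def Claim_equal_get_distances_to_empty_plot : Prop := ∀ (street_length : Int) (house_numbers : List String), Dom_get_distances_to_empty_plot street_length house_numbers → Pre_get_distances_to_empty_plot street_length house_numbers → Spec_get_distances_to_empty_plot street_length house_numbers (get_distances_to_empty_plot street_length house_numbers)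

-- ===== LEMMAS AND PROOFS =====

-- the zero-index list both ports compute, as filter+map over enumerate
def pvZ (hn : List String) : List Int :=
  ((PySem.List.enumerate hn).filter (fun p => p.2 = "0")).map (·.1)

theorem getD_mem_of_lt (zs : List Int) (j : Nat) (hj : j < zs.length) : zs.getD j 0 ∈ zs := by
  rw [List.getD_eq_getElem zs 0 hj]
  exact List.getElem_mem hj

theorem pvZ_pairwise (hn : List String) : (pvZ hn).Pairwise (· < ·) := by
  unfold pvZ
  rw [List.pairwise_map]
  exact List.Pairwise.filter _ (PySem.List.pairwise_lt_enumerate hn 0)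

theorem pvZ_mem (hn : List String) (z : Int) :
    z ∈ pvZ hn ↔ ∃ k : Nat, k < hn.length ∧ z = (k : Int) ∧ hn[k]? = some "0" := by
  simp only [pvZ, List.mem_map, List.mem_filter, PySem.List.mem_enumerate_iff]
  constructor
  · rintro ⟨⟨i, x⟩, ⟨⟨k, hk, hpair⟩, hx⟩, rfl⟩
    obtain ⟨rfl, rfl⟩ := Prod.mk.injEq .. ▸ hpair
    refine ⟨k, hk, by simp, ?_⟩
    simp only [decide_eq_true_eq] at hx
    simp [List.getElem?_eq_getElem hk, hx]
  · rintro ⟨k, hk, rfl, h0⟩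
    rw [List.getElem?_eq_getElem hk] at h0
    refine ⟨(0 + (k : Int), hn[k]), ⟨⟨k, hk, rfl⟩, ?_⟩, by simp⟩
    simp [Option.some.injEq] at h0 ⊢
    exact h0

theorem pvZ_foldA (hn : List String) :
    (PySem.List.enumerate hn).foldl (fun acc p => if p.2 = "0" then acc ++ [p.1] else acc) [] = pvZ hn := by
  simpa [pvZ] using
    PySem.List.foldl_append_ite (l := PySem.List.enumerate hn) (p := fun q => q.2 = "0")
      (f := (·.1)) (acc := [])

theorem sorted_getD_mono (zs : List Int) (hs : zs.Pairwise (· < ·)) (i j : Nat)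
    (hij : i ≤ j) (hj : j < zs.length) : zs.getD i 0 ≤ zs.getD j 0 := by
  have hi : i < zs.length := by omega
  rw [List.getD_eq_getElem zs 0 hi, List.getD_eq_getElem zs 0 hj]
  by_cases h : i < j
  · exact le_of_lt ((List.pairwise_iff_getElem.mp hs) i j hi hj h)
  · have : i = j := by omega
    subst this; rfl

-- no element of a strictly sorted list lies strictly between two consecutive elements
theorem sorted_not_between (zs : List Int) (hs : zs.Pairwise (· < ·)) (z : Int) (hz : z ∈ zs)
    (j : Nat) (hj : j + 1 < zs.length) : ¬ (zs.getD j 0 < z ∧ z < zs.getD (j+1) 0) := by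
  obtain ⟨t, ht, rfl⟩ := List.getElem_of_mem hz
  rw [← List.getD_eq_getElem zs 0 ht]
  by_cases h : t ≤ j
  · have := sorted_getD_mono zs hs t j h (by omega)
    omega
  · have := sorted_getD_mono zs hs (j+1) t (by omega) ht
    omega

theorem sorted_head_le (zs : List Int) (hs : zs.Pairwise (· < ·)) (z : Int) (hz : z ∈ zs) :
    zs.getD 0 0 ≤ z := by
  obtain ⟨t, ht, rfl⟩ := List.getElem_of_mem hz
  rw [← List.getD_eq_getElem zs 0 ht]
  exact sorted_getD_mono zs hs 0 t (by omega) ht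

theorem sorted_le_last (zs : List Int) (hs : zs.Pairwise (· < ·)) (z : Int) (hz : z ∈ zs) :
    z ≤ zs.getD (zs.length - 1) 0 := by
  obtain ⟨t, ht, rfl⟩ := List.getElem_of_mem hz
  rw [← List.getD_eq_getElem zs 0 ht]
  exact sorted_getD_mono zs hs t (zs.length - 1) (by omega) (by omega)

theorem exists_flank : ∀ (zs : List Int), zs.Pairwise (· < ·) → ∀ p : Int,
    (∃ z ∈ zs, z ≤ p) → (∃ z ∈ zs, p ≤ z) → p ∉ zs →
    ∃ j : Nat, j + 1 < zs.length ∧ zs.getD j 0 < p ∧ p < zs.getD (j+1) 0 := by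
  intro zs
  induction zs with
  | nil => intro _ p h; simp at h
  | cons a t ih =>
    intro hp p hle hge hnm
    rcases t with _ | ⟨b, t'⟩
    · obtain ⟨z, hz, hz1⟩ := hle
      obtain ⟨w, hw, hw1⟩ := hge
      simp only [List.mem_singleton] at hz hw
      have hpa : p = a := by omega
      exact absurd (show p ∈ [a] by simp [hpa]) hnm
    · have hab : a < b := (List.pairwise_cons.mp hp).1 b (by simp)
      have htp : (b :: t').Pairwise (· < ·) := (List.pairwise_cons.mp hp).2
      by_cases hpb : p < b
      · -- flank is (a, b)
        have hap : a < p := by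
          obtain ⟨z, hz, hz1⟩ := hle
          rcases List.mem_cons.mp hz with rfl | hz2
          · have : z ≠ p := fun h => hnm (h ▸ hz)
            omega
          · have := sorted_head_le _ htp z hz2
            simp only [List.getD_cons_zero] at this
            omega
        exact ⟨0, by simp, by simpa using hap, by simpa using hpb⟩
      · push_neg at hpb
        have hle' : ∃ z ∈ (b :: t'), z ≤ p := ⟨b, by simp, hpb⟩
        have hge' : ∃ z ∈ (b :: t'), p ≤ z := by
          obtain ⟨w, hw, hw1⟩ := hge
          rcases List.mem_cons.mp hw with rfl | hw2
          · omega
          · exact ⟨w, hw2, hw1⟩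
        have hnm' : p ∉ (b :: t') := fun h => hnm (List.mem_cons_of_mem _ h)
        obtain ⟨j, hj, h1, h2⟩ := ih htp p hle' hge' hnm'
        exact ⟨j + 1, by simpa using hj, by simpa using h1, by simpa using h2⟩

-- the value of min(abs(p - z) for z in zs) is any value achieved and minimal
theorem min_abs_eq (zs : List Int) (p v : Int)
    (hw : ∃ z ∈ zs, |p - z| = v)
    (hlb : ∀ z ∈ zs, v ≤ |p - z|) :
    (PySem.List.min? (zs.map (fun z => |p - z|)) (fun x => x)).getD 0 = v := by
  obtain ⟨z, hz, hv⟩ := hw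
  cases hmin : PySem.List.min? (zs.map (fun z => |p - z|)) (fun x => x) with
  | none =>
    rw [PySem.List.min?_eq_none_iff] at hmin
    rw [List.map_eq_nil_iff] at hmin
    subst hmin; simp at hz
  | some m =>
    have hmem := PySem.List.min?_mem hmin
    obtain ⟨z', hz', hm⟩ := List.mem_map.mp hmem
    have h1 : v ≤ m := hm ▸ hlb z' hz'
    have h2 : m ≤ v := by
      have := PySem.List.min?_isMin hmin (|p - z|) (List.mem_map.mpr ⟨z, hz, rfl⟩)
      simpa [hv] using this
    simp only [Option.getD_some]
    omega

theorem pvFillMid_length : ∀ (hn : List String) (l r d : Int),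
    (pvFillMid hn l r d).length = hn.length := by
  intro hn l r d
  induction hn, l, r, d using pvFillMid.induct with
  | case1 hn l r d h ih =>
    rw [pvFillMid, if_pos h]
    simpa [PySem.List.length_pySetD] using ih
  | case2 hn l r d h =>
    rw [pvFillMid, if_neg h]

theorem pvFillHead_length : ∀ (hn : List String) (r d : Int),
    (pvFillHead hn r d).length = hn.length := by
  intro hn r d
  induction hn, r, d using pvFillHead.induct with
  | case1 hn r d h ih =>
    rw [pvFillHead, if_pos h]
    simpa [PySem.List.length_pySetD] using ih
  | case2 hn r d h =>
    rw [pvFillHead, if_neg h]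

theorem pvFillTail_length : ∀ (hn : List String) (sl l d : Int),
    (pvFillTail hn sl l d).length = hn.length := by
  intro hn sl l d
  induction hn, l, d using pvFillTail.induct sl with
  | case1 hn l d h ih =>
    rw [pvFillTail, if_pos h]
    simpa [PySem.List.length_pySetD] using ih
  | case2 hn l d h =>
    rw [pvFillTail, if_neg h]

theorem pvFillMid_get : ∀ (hn : List String) (l r d : Int), 0 ≤ l → r < (hn.length : Int) →
    ∀ p : Nat, (pvFillMid hn l r d)[p]? =
      if l ≤ (p : Int) ∧ (p : Int) ≤ r then
        some (PySem.Int.toStr (d + min ((p : Int) - l) (r - (p : Int))))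
      else hn[p]? := by
  intro hn l r d
  induction hn, l, r, d using pvFillMid.induct with
  | case2 hn l r d h =>
    intro h0 hr p
    rw [pvFillMid, if_neg h, if_neg (by omega)]
  | case1 hn l r d hlr ih =>
    intro h0 hr p
    rw [pvFillMid, if_pos hlr]
    have hsets : PySem.List.pySetD (PySem.List.pySetD hn l (PySem.Int.toStr d)) r (PySem.Int.toStr d)
        = (hn.set l.toNat (PySem.Int.toStr d)).set r.toNat (PySem.Int.toStr d) := by
      have e1 := PySem.List.pySetD_of_nonneg hn (PySem.Int.toStr d) (show (0:Int) ≤ l from by omega)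
      have e2 := PySem.List.pySetD_of_nonneg (hn.set l.toNat (PySem.Int.toStr d))
        (PySem.Int.toStr d) (show (0:Int) ≤ r from by omega)
      rw [e1, e2]
    rw [ih (by omega) (by simp [PySem.List.length_pySetD]; omega) p, hsets]
    by_cases hin : l + 1 ≤ (p : Int) ∧ (p : Int) ≤ r - 1
    · rw [if_pos hin, if_pos (by omega)]
      have harg : d + 1 + min ((p : Int) - (l + 1)) (r - 1 - (p : Int))
          = d + min ((p : Int) - l) (r - (p : Int)) := by omega
      rw [harg]
    · rw [if_neg hin]
      by_cases hedge : (p : Int) = l ∨ (p : Int) = r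
      · have hplen : p < hn.length := by omega
        have hLHS : ((hn.set l.toNat (PySem.Int.toStr d)).set r.toNat (PySem.Int.toStr d))[p]?
            = some (PySem.Int.toStr d) := by
          rcases hedge with hpl | hpr
          · by_cases hrl : r.toNat = p
            · simp [List.getElem?_set, hrl, hplen]
            · have hlp : l.toNat = p := by omega
              simp [List.getElem?_set, hrl, hlp, hplen]
          · have hrp : r.toNat = p := by omega
            simp [List.getElem?_set, hrp, hplen]
        rw [hLHS, if_pos (by omega)]
        have harg : d + min ((p : Int) - l) (r - (p : Int)) = d := by omega
        rw [harg]
      · push_neg at hedge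
        have h1 : l.toNat ≠ p := by omega
        have h2 : r.toNat ≠ p := by omega
        rw [if_neg (by omega)]
        simp [List.getElem?_set, h1, h2]

theorem pvFillHead_get : ∀ (hn : List String) (r d : Int), r < (hn.length : Int) →
    ∀ p : Nat, (pvFillHead hn r d)[p]? =
      if (p : Int) ≤ r then some (PySem.Int.toStr (d + (r - (p : Int)))) else hn[p]? := by
  intro hn r d
  induction hn, r, d using pvFillHead.induct with
  | case2 hn r d h =>
    intro hr p
    rw [pvFillHead, if_neg h, if_neg (by omega)]
  | case1 hn r d h0 ih =>
    intro hr p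
    rw [pvFillHead, if_pos h0]
    have hset : PySem.List.pySetD hn r (PySem.Int.toStr d) = hn.set r.toNat (PySem.Int.toStr d) :=
      PySem.List.pySetD_of_nonneg hn (PySem.Int.toStr d) (show (0:Int) ≤ r from by omega)
    rw [ih (by simp [PySem.List.length_pySetD]; omega) p, hset]
    by_cases hin : (p : Int) ≤ r - 1
    · rw [if_pos hin, if_pos (by omega)]
      have harg : d + 1 + (r - 1 - (p : Int)) = d + (r - (p : Int)) := by omega
      rw [harg]
    · rw [if_neg hin]
      by_cases hpr : (p : Int) = r
      · have hplen : p < hn.length := by omega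
        have hrp : r.toNat = p := by omega
        rw [if_pos (by omega)]
        have harg : d + (r - (p : Int)) = d := by omega
        rw [harg]
        simp [List.getElem?_set, hrp, hplen]
      · rw [if_neg (by omega)]
        have h2 : r.toNat ≠ p := by omega
        simp [List.getElem?_set, h2]

theorem pvFillTail_get : ∀ (hn : List String) (sl l d : Int), 0 ≤ l → sl ≤ (hn.length : Int) →
    ∀ p : Nat, (pvFillTail hn sl l d)[p]? =
      if l ≤ (p : Int) ∧ (p : Int) ≤ sl - 1 then
        some (PySem.Int.toStr (d + ((p : Int) - l)))
      else hn[p]? := by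
  intro hn sl l d
  induction hn, l, d using pvFillTail.induct sl with
  | case2 hn l d h =>
    intro h0 hsl p
    rw [pvFillTail, if_neg h, if_neg (by omega)]
  | case1 hn l d hls ih =>
    intro h0 hsl p
    rw [pvFillTail, if_pos hls]
    have hset : PySem.List.pySetD hn l (PySem.Int.toStr d) = hn.set l.toNat (PySem.Int.toStr d) :=
      PySem.List.pySetD_of_nonneg hn (PySem.Int.toStr d) (show (0:Int) ≤ l from by omega)
    rw [ih (by omega) (by simp [PySem.List.length_pySetD]; omega) p, hset]
    by_cases hin : l + 1 ≤ (p : Int) ∧ (p : Int) ≤ sl - 1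
    · rw [if_pos hin, if_pos (by omega)]
      have harg : d + 1 + ((p : Int) - (l + 1)) = d + ((p : Int) - l) := by omega
      rw [harg]
    · rw [if_neg hin]
      by_cases hpl : (p : Int) = l
      · have hplen : p < hn.length := by omega
        have hlp : l.toNat = p := by omega
        rw [if_pos (by omega)]
        have harg : d + ((p : Int) - l) = d := by omega
        rw [harg]
        simp [List.getElem?_set, hlp, hplen]
      · rw [if_neg (by omega)]
        have h2 : l.toNat ≠ p := by omega
        simp [List.getElem?_set, h2]

-- the pairs loop of port A, characterised position by position
theorem gaps_get (zs : List Int) (hs : zs.Pairwise (· < ·)) (N : Nat)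
    (hb : ∀ z ∈ zs, 0 ≤ z ∧ z < (N : Int)) :
    ∀ (m : Nat), m + 1 ≤ zs.length → ∀ (g : List String), g.length = N →
    ((PySem.List.pyRange 0 (m : Int) 1).foldl
        (fun h idx =>
          if PySem.List.pyGetD zs (idx + 1) 0 - PySem.List.pyGetD zs idx 0 > 1 then
            pvFillMid h (PySem.List.pyGetD zs idx 0 + 1) (PySem.List.pyGetD zs (idx + 1) 0 - 1) 1
          else h) g).length = N ∧
    (∀ p : Nat, p < N →
      ((∀ j : Nat, j + 1 < zs.length → j < m →
          ¬ (zs.getD j 0 < (p : Int) ∧ (p : Int) < zs.getD (j+1) 0)) →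
        ((PySem.List.pyRange 0 (m : Int) 1).foldl
          (fun h idx =>
            if PySem.List.pyGetD zs (idx + 1) 0 - PySem.List.pyGetD zs idx 0 > 1 then
              pvFillMid h (PySem.List.pyGetD zs idx 0 + 1) (PySem.List.pyGetD zs (idx + 1) 0 - 1) 1
            else h) g)[p]? = g[p]?) ∧
      (∀ j : Nat, j + 1 < zs.length → j < m →
          zs.getD j 0 < (p : Int) → (p : Int) < zs.getD (j+1) 0 →
        ((PySem.List.pyRange 0 (m : Int) 1).foldl
          (fun h idx =>
            if PySem.List.pyGetD zs (idx + 1) 0 - PySem.List.pyGetD zs idx 0 > 1 then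
              pvFillMid h (PySem.List.pyGetD zs idx 0 + 1) (PySem.List.pyGetD zs (idx + 1) 0 - 1) 1
            else h) g)[p]? =
          some (PySem.Int.toStr (min ((p : Int) - zs.getD j 0) (zs.getD (j+1) 0 - (p : Int)))))) := by
  intro m
  induction m with
  | zero =>
    intro _ g hg
    rw [Nat.cast_zero, PySem.List.pyRange_one_eq_nil (by omega)]
    refine ⟨hg, fun p hp => ⟨fun _ => rfl, fun j hj hj0 => absurd hj0 (by omega)⟩⟩
  | succ m ih =>
    intro hm g hg
    obtain ⟨ihlen, ihget⟩ := ih (by omega) g hg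
    have hmlt : m < zs.length := by omega
    have hm1lt : m + 1 < zs.length := by omega
    have hrange : PySem.List.pyRange 0 ((m + 1 : Nat) : Int) 1
        = PySem.List.pyRange 0 ((m : Nat) : Int) 1 ++ [((m : Nat) : Int)] := by
      have hcast : ((m + 1 : Nat) : Int) = ((m : Nat) : Int) + 1 := by push_cast; ring
      rw [hcast]
      exact PySem.List.pyRange_one_succ_right (by omega)
    rw [hrange, List.foldl_append, List.foldl_cons, List.foldl_nil]
    have hzi : PySem.List.pyGetD zs ((m : Nat) : Int) 0 = zs.getD m 0 := by simp
    have hzi1 : PySem.List.pyGetD zs (((m : Nat) : Int) + 1) 0 = zs.getD (m + 1) 0 := by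
      rw [show (((m : Nat) : Int) + 1) = ((m + 1 : Nat) : Int) from by push_cast; ring]
      exact PySem.List.pyGetD_natCast ..
    rw [hzi, hzi1]
    have hbm := hb _ (getD_mem_of_lt zs m hmlt)
    have hbm1 := hb _ (getD_mem_of_lt zs (m + 1) hm1lt)
    by_cases hgap : zs.getD (m + 1) 0 - zs.getD m 0 > 1
    · rw [if_pos hgap]
      refine ⟨by rw [pvFillMid_length]; exact ihlen, fun p hp => ⟨?_, ?_⟩⟩
      · intro hno
        have hnom : ¬ (zs.getD m 0 < (p : Int) ∧ (p : Int) < zs.getD (m + 1) 0) :=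
          hno m hm1lt (by omega)
        rw [pvFillMid_get _ _ _ _ (by omega) (by rw [ihlen]; omega) p, if_neg (by omega)]
        exact (ihget p hp).1 (fun j hj hjm => hno j hj (by omega))
      · intro j hj hjm h1 h2
        by_cases hjem : j = m
        · subst hjem
          rw [pvFillMid_get _ _ _ _ (by omega) (by rw [ihlen]; omega) p, if_pos (by omega)]
          have harg : 1 + min ((p : Int) - (zs.getD j 0 + 1)) (zs.getD (j + 1) 0 - 1 - (p : Int))
              = min ((p : Int) - zs.getD j 0) (zs.getD (j + 1) 0 - (p : Int)) := by omega
          rw [harg]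
        · have hjm' : j < m := by omega
          have hmono : zs.getD (j + 1) 0 ≤ zs.getD m 0 :=
            sorted_getD_mono zs hs (j + 1) m (by omega) hmlt
          rw [pvFillMid_get _ _ _ _ (by omega) (by rw [ihlen]; omega) p, if_neg (by omega)]
          exact (ihget p hp).2 j hj hjm' h1 h2
    · rw [if_neg hgap]
      refine ⟨ihlen, fun p hp => ⟨?_, ?_⟩⟩
      · intro hno
        exact (ihget p hp).1 (fun j hj hjm => hno j hj (by omega))
      · intro j hj hjm h1 h2
        by_cases hjem : j = m
        · subst hjem; omega
        · exact (ihget p hp).2 j hj (by omega) h1 h2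

-- port B computes pvZ
theorem pvZ_def' (hn : List String) :
    ((PySem.List.enumerate hn).filter (fun p => p.2 = "0")).map (·.1) = pvZ hn := rfl

theorem headIf_get (g : List String) (z0 : Int) (N : Nat) (hg : g.length = N)
    (h0 : 0 ≤ z0) (hlt : z0 < (N : Int)) (p : Nat) :
    (if z0 ≠ 0 then pvFillHead g (z0 - 1) 1 else g)[p]? =
      if (p : Int) < z0 then some (PySem.Int.toStr (z0 - (p : Int))) else g[p]? := by
  by_cases h : z0 ≠ 0
  · rw [if_pos h, pvFillHead_get g (z0 - 1) 1 (by omega) p]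
    by_cases hin : (p : Int) ≤ z0 - 1
    · rw [if_pos hin, if_pos (by omega)]
      have harg : 1 + (z0 - 1 - (p : Int)) = z0 - (p : Int) := by omega
      rw [harg]
    · rw [if_neg hin, if_neg (by omega)]
  · rw [if_neg h]
    push_neg at h
    rw [if_neg (by omega)]

theorem tailIf_get (g : List String) (zl sl : Int) (N : Nat) (hg : g.length = N)
    (h0 : 0 ≤ zl) (hsl : sl ≤ (N : Int)) (p : Nat) :
    (if zl ≠ sl - 1 then pvFillTail g sl (zl + 1) 1 else g)[p]? =
      if zl < (p : Int) ∧ (p : Int) < sl then some (PySem.Int.toStr ((p : Int) - zl))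
      else g[p]? := by
  by_cases h : zl ≠ sl - 1
  · rw [if_pos h, pvFillTail_get g sl (zl + 1) 1 (by omega) (by omega) p]
    by_cases hin : zl + 1 ≤ (p : Int) ∧ (p : Int) ≤ sl - 1
    · rw [if_pos hin, if_pos (by omega)]
      have harg : 1 + ((p : Int) - (zl + 1)) = (p : Int) - zl := by omega
      rw [harg]
    · rw [if_neg hin, if_neg (by omega)]
  · rw [if_neg h]
    push_neg at h
    rw [if_neg (by omega)]

-- port B's first loop, characterised position by position (v is the written value)
theorem bfill1_get (v : Int → String) : ∀ (m : Nat) (hn : List String), m ≤ hn.length →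
    (((PySem.List.pyRange 0 (m : Int) 1).foldl
        (fun h i => if PySem.List.pyGetD h i "" ≠ "0" then PySem.List.pySetD h i (v i) else h)
        hn).length = hn.length) ∧
    (∀ p : Nat, ((PySem.List.pyRange 0 (m : Int) 1).foldl
        (fun h i => if PySem.List.pyGetD h i "" ≠ "0" then PySem.List.pySetD h i (v i) else h)
        hn)[p]? = if p < m ∧ ¬ hn[p]? = some "0" then some (v (p : Int)) else hn[p]?) := by
  intro m
  induction m with
  | zero =>
    intro hn hm
    rw [Nat.cast_zero, PySem.List.pyRange_one_eq_nil (by omega)]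
    exact ⟨rfl, fun p => by rw [List.foldl_nil, if_neg (by omega)]⟩
  | succ m ih =>
    intro hn hm
    obtain ⟨ihlen, ihget⟩ := ih hn (by omega)
    have hrange : PySem.List.pyRange 0 ((m + 1 : Nat) : Int) 1
        = PySem.List.pyRange 0 ((m : Nat) : Int) 1 ++ [((m : Nat) : Int)] := by
      rw [show ((m + 1 : Nat) : Int) = ((m : Nat) : Int) + 1 from by push_cast; ring]
      exact PySem.List.pyRange_one_succ_right (by omega)
    rw [hrange, List.foldl_append, List.foldl_cons, List.foldl_nil]
    have hmlt : m < hn.length := by omega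
    have hread : PySem.List.pyGetD
        ((PySem.List.pyRange 0 ((m : Nat) : Int) 1).foldl
          (fun h i => if PySem.List.pyGetD h i "" ≠ "0" then PySem.List.pySetD h i (v i) else h)
          hn) ((m : Nat) : Int) "" = hn[m] := by
      rw [PySem.List.pyGetD_natCast, List.getD_eq_getElem?_getD, ihget m,
        if_neg (by omega), List.getElem?_eq_getElem hmlt]
      rfl
    rw [hread]
    by_cases h0 : hn[m] = "0"
    · rw [if_neg (fun hc => hc h0)]
      refine ⟨ihlen, fun p => ?_⟩
      rw [ihget p]
      by_cases hpm : p = m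
      · subst hpm
        rw [if_neg (by omega), if_neg (by
          rintro ⟨-, hne⟩
          exact hne (by rw [List.getElem?_eq_getElem hmlt, h0]))]
      · by_cases hc : p < m ∧ ¬ hn[p]? = some "0"
        · rw [if_pos hc, if_pos ⟨by omega, hc.2⟩]
        · rw [if_neg hc, if_neg (by rintro ⟨h1, h2⟩; exact hc ⟨by omega, h2⟩)]
    · rw [if_pos h0, PySem.List.pySetD_natCast]
      refine ⟨by rw [List.length_set, ihlen], fun p => ?_⟩
      by_cases hpm : p = m
      · subst hpm
        have hsome : ¬ hn[p]? = some "0" := by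
          rw [List.getElem?_eq_getElem hmlt]
          exact fun hc => h0 (Option.some.inj hc)
        rw [if_pos ⟨by omega, hsome⟩, List.getElem?_set_self (by rw [ihlen]; omega)]
      · rw [List.getElem?_set_ne (by omega), ihget p]
        by_cases hc : p < m ∧ ¬ hn[p]? = some "0"
        · rw [if_pos hc, if_pos ⟨by omega, hc.2⟩]
        · rw [if_neg hc, if_neg (by rintro ⟨h1, h2⟩; exact hc ⟨by omega, h2⟩)]

-- port B's second loop, characterised position by position
theorem bfill2_get (v : Int → String) : ∀ (n : Nat) (a : Int) (g : List String), 0 ≤ a →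
    a + (n : Int) ≤ (g.length : Int) →
    (((PySem.List.pyRange a (a + (n : Int)) 1).foldl
        (fun h i => PySem.List.pySetD h i (v i)) g).length = g.length) ∧
    (∀ p : Nat, ((PySem.List.pyRange a (a + (n : Int)) 1).foldl
        (fun h i => PySem.List.pySetD h i (v i)) g)[p]? =
      if a ≤ (p : Int) ∧ (p : Int) < a + (n : Int) then some (v (p : Int)) else g[p]?) := by
  intro n
  induction n with
  | zero =>
    intro a g h0 hb
    rw [Nat.cast_zero, add_zero, PySem.List.pyRange_one_eq_nil (by omega)]
    exact ⟨rfl, fun p => by rw [List.foldl_nil, if_neg (by omega)]⟩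
  | succ n ih =>
    intro a g h0 hb
    rw [PySem.List.pyRange_one_cons (by omega), List.foldl_cons]
    have hset : PySem.List.pySetD g a (v a) = g.set a.toNat (v a) :=
      PySem.List.pySetD_of_nonneg g (v a) h0
    have hlen' : ((g.set a.toNat (v a)).length : Int) = (g.length : Int) := by
      rw [List.length_set]
    have hre : a + ((n + 1 : Nat) : Int) = (a + 1) + (n : Int) := by push_cast; ring
    rw [hre, hset]
    obtain ⟨ihlen, ihget⟩ := ih (a + 1) (g.set a.toNat (v a)) (by omega) (by omega)
    refine ⟨by rw [ihlen, List.length_set], fun p => ?_⟩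
    rw [ihget p]
    have halen : a < (g.length : Int) := by omega
    by_cases hpa : (p : Int) = a
    · have hap : a.toNat = p := by omega
      have hplen : p < g.length := by omega
      rw [if_neg (by omega), if_pos ⟨by omega, by omega⟩, hap]
      simp [List.getElem?_set, hplen, hpa]
    · by_cases hc : a + 1 ≤ (p : Int) ∧ (p : Int) < a + 1 + (n : Int)
      · rw [if_pos hc, if_pos ⟨by omega, by omega⟩]
      · rw [if_neg hc, if_neg (by rintro ⟨h1, h2⟩; exact hc ⟨by omega, by omega⟩),
          List.getElem?_set_ne (by omega)]

-- ===== VERDICT (by name: the statement is the Claim_ definition above) =====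
theorem get_distances_to_empty_plot_spec : Claim_equal_get_distances_to_empty_plot := by
  intro sl hn hdom hpre
  obtain ⟨hmem0, hsl⟩ := hpre
  unfold Spec_get_distances_to_empty_plot get_distances_to_empty_plot
    get_distances_to_empty_plot_alt
  simp only [pvZ_foldA, pvZ_def']
  have hs := pvZ_pairwise hn
  have hK : pvZ hn ≠ [] := by
    obtain ⟨k, hk, hk0⟩ := List.mem_iff_getElem.mp hmem0
    intro hnil
    have hm : (k : Int) ∈ pvZ hn :=
      (pvZ_mem hn _).mpr ⟨k, hk, rfl, by rw [List.getElem?_eq_getElem hk, hk0]⟩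
    rw [hnil] at hm
    simp at hm
  have hKpos : 0 < (pvZ hn).length := by
    cases hzs : pvZ hn with
    | nil => exact absurd hzs hK
    | cons a t => simp
  have hb : ∀ z ∈ pvZ hn, 0 ≤ z ∧ z < (hn.length : Int) := by
    intro z hz
    obtain ⟨k, hk, rfl, _⟩ := (pvZ_mem hn z).mp hz
    omega
  have hz0mem : (pvZ hn).getD 0 0 ∈ pvZ hn := getD_mem_of_lt _ 0 hKpos
  have hzlmem : (pvZ hn).getD ((pvZ hn).length - 1) 0 ∈ pvZ hn :=
    getD_mem_of_lt _ _ (by omega)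
  have hz0b := hb _ hz0mem
  have hzlb := hb _ hzlmem
  have hz0zl : (pvZ hn).getD 0 0 ≤ (pvZ hn).getD ((pvZ hn).length - 1) 0 :=
    sorted_getD_mono _ hs 0 _ (by omega) (by omega)
  have hz0e : PySem.List.pyGetD (pvZ hn) 0 0 = (pvZ hn).getD 0 0 := by
    rw [PySem.List.pyGetD_zero]
  have hzle : PySem.List.pyGetD (pvZ hn) (-1) 0 = (pvZ hn).getD ((pvZ hn).length - 1) 0 := by
    rw [PySem.List.pyGetD_neg_one (h := hK), List.getLast_eq_getElem,
      ← List.getD_eq_getElem (pvZ hn) 0 (by omega)]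
  have hc : ((pvZ hn).length : Int) - 1 = (((pvZ hn).length - 1 : Nat) : Int) := by omega
  simp only [hz0e, hzle, hc]
  -- abbreviations
  set zl : Int := (pvZ hn).getD ((pvZ hn).length - 1) 0 with hzl
  set z0 : Int := (pvZ hn).getD 0 0 with hz0
  -- A side: the pairs loop
  obtain ⟨hlen1, hget1⟩ :=
    gaps_get (pvZ hn) hs hn.length hb ((pvZ hn).length - 1) (by omega) hn rfl
  -- B side: first loop with m := zl.toNat
  have hzlc : zl = ((zl.toNat : Nat) : Int) := by omega
  obtain ⟨blen1, bget1⟩ := bfill1_get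
    (fun i => PySem.Int.toStr
      ((PySem.List.min? ((pvZ hn).map (fun z => ((i - z).natAbs : Int))) (fun x => x)).getD 0))
    zl.toNat hn (by omega)
  rw [hzlc]
  apply List.ext_getElem?
  intro p
  -- B side second loop: either a real range or empty
  by_cases hp : p < hn.length
  · -- A value at p
    rw [tailIf_get _ _ sl hn.length (by split_ifs <;> simp [pvFillHead_length, hlen1])
        (by omega) (by omega) p]
    rw [headIf_get _ _ hn.length hlen1 (by omega) (by omega) p]
    -- B value at p: second loop
    have hB2 : ∀ q : Nat, ((PySem.List.pyRange (((zl.toNat : Nat) : Int) + 1) sl 1).foldl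
        (fun h i => PySem.List.pySetD h i (PySem.Int.toStr (i - ((zl.toNat : Nat) : Int))))
        ((PySem.List.pyRange 0 ((zl.toNat : Nat) : Int) 1).foldl
          (fun h i => if PySem.List.pyGetD h i "" ≠ "0" then PySem.List.pySetD h i
            (PySem.Int.toStr ((PySem.List.min? ((pvZ hn).map
              (fun z => ((i - z).natAbs : Int))) (fun x => x)).getD 0)) else h) hn))[q]? =
        if ((zl.toNat : Nat) : Int) + 1 ≤ (q : Int) ∧ (q : Int) < sl then
          some (PySem.Int.toStr ((q : Int) - ((zl.toNat : Nat) : Int)))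
        else ((PySem.List.pyRange 0 ((zl.toNat : Nat) : Int) 1).foldl
          (fun h i => if PySem.List.pyGetD h i "" ≠ "0" then PySem.List.pySetD h i
            (PySem.Int.toStr ((PySem.List.min? ((pvZ hn).map
              (fun z => ((i - z).natAbs : Int))) (fun x => x)).getD 0)) else h) hn)[q]? := by
      intro q
      by_cases hab : ((zl.toNat : Nat) : Int) + 1 ≤ sl
      · have hslr : sl = (((zl.toNat : Nat) : Int) + 1) + (((sl - zl - 1).toNat : Nat) : Int) := by
          omega
        rw [hslr]
        exact (bfill2_get (fun i => PySem.Int.toStr (i - ((zl.toNat : Nat) : Int)))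
          (sl - zl - 1).toNat (((zl.toNat : Nat) : Int) + 1)
          _ (by omega) (by rw [blen1]; omega)).2 q
      · rw [show PySem.List.pyRange (((zl.toNat : Nat) : Int) + 1) sl 1 = [] from
            PySem.List.pyRange_one_eq_nil (by omega), List.foldl_nil, if_neg (by omega)]
    rw [hB2 p, bget1 p]
    by_cases hz : hn[p] = "0"
    · have hpz : (p : Int) ∈ pvZ hn :=
        (pvZ_mem hn _).mpr ⟨p, hp, rfl, by rw [List.getElem?_eq_getElem hp, hz]⟩
      have hle1 := sorted_le_last _ hs _ hpz
      have hle2 := sorted_head_le _ hs _ hpz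
      rw [if_neg (by omega), if_neg (by omega), if_neg (by omega),
        if_neg (by
          rintro ⟨-, hne⟩
          exact hne (by rw [List.getElem?_eq_getElem hp, hz]))]
      exact (hget1 p hp).1 (fun j hj hjm => sorted_not_between _ hs _ hpz j hj)
    · have hpz : (p : Int) ∉ pvZ hn := by
        intro hmem
        obtain ⟨k, hk, hkk, h0⟩ := (pvZ_mem hn _).mp hmem
        have hkp : k = p := by omega
        subst hkp
        rw [List.getElem?_eq_getElem hk] at h0
        exact hz (Option.some.inj h0)
      have hpz' : ¬ hn[p]? = some "0" := by
        rw [List.getElem?_eq_getElem hp]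
        exact fun hc => hz (Option.some.inj hc)
      by_cases hgtl : ((zl.toNat : Nat) : Int) < (p : Int)
      · -- after the last zero
        by_cases hps : (p : Int) < sl
        · rw [if_pos ⟨by omega, hps⟩, if_pos ⟨by omega, hps⟩]
        · rw [if_neg (by omega), if_neg (by omega), if_neg (by omega), if_neg (by omega)]
          exact (hget1 p hp).1 (fun j hj hjm => by
            have := sorted_getD_mono (pvZ hn) hs (j + 1) ((pvZ hn).length - 1) (by omega) (by omega)
            omega)
      · -- p < zl (p ≠ zl since p ∉ zeros), first loop wrote the min distance
        have hplt : p < zl.toNat := by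
          have : (p : Int) ≠ ((zl.toNat : Nat) : Int) := fun hc => hpz (hc ▸ (hzlc ▸ hzlmem))
          omega
        by_cases hlt0 : (p : Int) < z0
        · rw [if_neg (by omega), if_pos hlt0, if_neg (by omega), if_pos ⟨hplt, hpz'⟩]
          have hmin := min_abs_eq (pvZ hn) (p : Int) (z0 - (p : Int))
            ⟨z0, hz0mem, by
              rcases abs_cases ((p : Int) - z0) with ⟨h1, h2⟩ | ⟨h1, h2⟩ <;> omega⟩
            (fun z hzm => by
              have := sorted_head_le _ hs z hzm
              rcases abs_cases ((p : Int) - z) with ⟨h1, h2⟩ | ⟨h1, h2⟩ <;> omega)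
          simp only [Int.natCast_natAbs]
          rw [hmin]
        · obtain ⟨j, hj, hj1, hj2⟩ := exists_flank (pvZ hn) hs (p : Int)
            ⟨z0, hz0mem, by omega⟩ ⟨zl, hzlmem, by omega⟩ hpz
          rw [if_neg (by omega), if_neg hlt0, if_neg (by omega), if_pos ⟨hplt, hpz'⟩]
          rw [(hget1 p hp).2 j hj (by omega) hj1 hj2]
          have hmin := min_abs_eq (pvZ hn) (p : Int)
            (min ((p : Int) - (pvZ hn).getD j 0) ((pvZ hn).getD (j + 1) 0 - (p : Int)))
            (by
              rcases le_total ((p : Int) - (pvZ hn).getD j 0)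
                  ((pvZ hn).getD (j + 1) 0 - (p : Int)) with hle | hle
              · refine ⟨(pvZ hn).getD j 0, getD_mem_of_lt _ j (by omega), ?_⟩
                rcases abs_cases ((p : Int) - (pvZ hn).getD j 0) with ⟨h1, h2⟩ | ⟨h1, h2⟩ <;> omega
              · refine ⟨(pvZ hn).getD (j + 1) 0, getD_mem_of_lt _ (j + 1) (by omega), ?_⟩
                rcases abs_cases ((p : Int) - (pvZ hn).getD (j + 1) 0) with
                  ⟨h1, h2⟩ | ⟨h1, h2⟩ <;> omega)
            (fun z hzm => by
              have hnb := sorted_not_between _ hs z hzm j hj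
              rcases abs_cases ((p : Int) - z) with ⟨h1, h2⟩ | ⟨h1, h2⟩ <;> omega)
          simp only [Int.natCast_natAbs]
          rw [hmin]
  · -- out of range: both sides are none
    rw [List.getElem?_eq_none, List.getElem?_eq_none]
    · by_cases hab : ((zl.toNat : Nat) : Int) + 1 ≤ sl
      · have hslr : sl = (((zl.toNat : Nat) : Int) + 1) + (((sl - zl - 1).toNat : Nat) : Int) := by
          omega
        rw [hslr, (bfill2_get _ (sl - zl - 1).toNat _ _ (by omega) (by rw [blen1]; omega)).1,
          blen1]
        omega
      · rw [show PySem.List.pyRange (((zl.toNat : Nat) : Int) + 1) sl 1 = [] from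
            PySem.List.pyRange_one_eq_nil (by omega), List.foldl_nil, blen1]
        omega
    · split_ifs <;>
        simp [pvFillTail_length, pvFillHead_length, hlen1] <;> omega
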